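-- pv_equiv track=rewrite | github.com/fabiansato/Python-Ejercicios | clase 12/SegundoParcial1S2015/sumoPrimos.py | sumoPrimos
-- ===== SOURCE A (Python) =====
-- def esPrimo(n):
--     for i in range(2,n):
--         if n%i==0:
--             return False
--     return True
--
-- def sumoPrimos(n):
--     i=2
--     suma=0
--     cont=0
--
--     while(suma<=n):
--         while( not esPrimo(i)):
--             i=i+1
--         suma=suma+i
--         cont=cont+1
--         i=i+1
--     return cont
-- ===== SOURCE B (Python) =====
-- def _is_prime(m):
--     if m < 2:
--         return False
--     d = 2
--     while d * d <= m:
--         if m % d == 0: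
--             return False
--         d += 1
--     return True
--
--
-- def _next_prime(i):
--     while not _is_prime(i):
--         i += 1
--     return i
--
--
-- def sumoPrimos(n):
--     count = 0
--     remaining = n
--     p = 2
--     while remaining >= 0:
--         remaining -= p
--         count += 1
--         p = _next_prime(p + 1)
--     return count
-- ===== Notes on version B (the rewrite author's own statement) =====
-- stated objective: faster
-- what changed: B tests primality by trial division only up to sqrt(m) (d*d<=m) instead of all divisors below m, and the outer loop counts down a 'remaining' budget while always holding the current prime, instead of A's suma accumulator with an inner scan restarting the divisor-free test from the full range.
import Mathlib
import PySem

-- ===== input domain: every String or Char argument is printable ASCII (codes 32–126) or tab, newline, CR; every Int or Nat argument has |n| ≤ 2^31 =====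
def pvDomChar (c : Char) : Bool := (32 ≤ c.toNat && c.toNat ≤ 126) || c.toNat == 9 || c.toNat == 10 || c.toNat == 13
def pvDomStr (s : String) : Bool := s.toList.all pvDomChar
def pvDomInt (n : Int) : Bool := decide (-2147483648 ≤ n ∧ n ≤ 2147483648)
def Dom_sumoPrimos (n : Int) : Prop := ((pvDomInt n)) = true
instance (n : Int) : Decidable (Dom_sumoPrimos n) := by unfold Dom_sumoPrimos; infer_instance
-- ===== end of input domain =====

-- B replaces A's full trial division (all candidate divisors below m) by trial division with
-- d*d <= m only, and counts down the remaining budget while carrying the current prime.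

-- ===== PORT A =====
-- esPrimo: 'for i in range(2,n): if n%i==0: return False; return True'
def esPrimo (n : Int) : Bool :=
  (PySem.List.pyRange 2 n 1).all (fun i => !(PySem.Int.mod n i == 0))

-- characterisation of esPrimo, needed for findA's termination proof below
theorem esPrimo_eq_true_iff (m : Int) :
    esPrimo m = true ↔ ∀ i : Int, 2 ≤ i → i < m → ¬ (i ∣ m) := by
  simp [esPrimo, List.all_eq_true, PySem.List.mem_pyRange_one,
        PySem.Int.mod_eq_zero_iff_dvd]

theorem esPrimo_of_prime (p : Nat) (hp : p.Prime) : esPrimo (p : Int) = true := by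
  rw [esPrimo_eq_true_iff]
  intro i h2 hlt hdvd
  have hi : ((i.toNat : Int)) = i := Int.toNat_of_nonneg (by omega)
  have : (i.toNat : Int) ∣ (p : Int) := by rw [hi]; exact hdvd
  have hdn : i.toNat ∣ p := Int.natCast_dvd_natCast.mp this
  exact (Nat.prime_def_lt'.mp hp).2 i.toNat (by omega) (by omega) hdn

-- there is always an esPrimo-true point at or above i (infinitude of primes):
-- this justifies termination of A's inner 'while not esPrimo(i): i += 1'
theorem exists_esPrimo (i : Int) : ∃ k : Nat, esPrimo (i + (k : Int)) = true := by
  by_cases hi : i ≤ 2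
  · exact ⟨0, by rw [esPrimo_eq_true_iff]; intro j h2 hlt; omega⟩
  · obtain ⟨p, hple, hp⟩ := Nat.exists_infinite_primes i.toNat
    refine ⟨p - i.toNat, ?_⟩
    have : i + ((p - i.toNat : Nat) : Int) = (p : Int) := by omega
    rw [this]; exact esPrimo_of_prime p hp

theorem findA_dec (i : Int) (h : ¬ esPrimo i = true) :
    Nat.find (exists_esPrimo (i + 1)) < Nat.find (exists_esPrimo i) := by
  have hK := Nat.find_spec (exists_esPrimo i)
  set K := Nat.find (exists_esPrimo i) with hKdef
  have hK0 : K ≠ 0 := by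
    intro h0; rw [h0] at hK; norm_num at hK; exact h hK
  have hstep : esPrimo ((i + 1) + ((K - 1 : Nat) : Int)) = true := by
    have he : (i + 1) + ((K - 1 : Nat) : Int) = i + (K : Int) := by omega
    rw [he]; exact hK
  have h2 : Nat.find (exists_esPrimo (i + 1)) ≤ K - 1 := Nat.find_le hstep
  omega

-- inner while loop of A: advance i until esPrimo i
def findA (i : Int) : Int :=
  if h : esPrimo i then i else findA (i + 1)
termination_by Nat.find (exists_esPrimo i)
decreasing_by exact findA_dec i h

theorem findA_ge (i : Int) : i ≤ findA i := by
  induction i using findA.induct with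
  | case1 i h => rw [findA, dif_pos h]
  | case2 i h ih => rw [findA, dif_neg h]; omega

theorem two_le_findA_succ (i : Int) (hi : 2 ≤ i) : 2 ≤ findA i + 1 := by
  have := findA_ge i; omega

theorem loopA_dec (n i suma : Int) (hi : 2 ≤ i) (hc : suma ≤ n) :
    (n - (suma + findA i) + 1).toNat < (n - suma + 1).toNat := by
  have := findA_ge i; omega

-- outer while loop of A, state (i, suma, cont); 2 ≤ i is A's loop invariant
def loopA (n i suma cont : Int) (hi : 2 ≤ i) : Int :=
  if hc : suma ≤ n then
    loopA n (findA i + 1) (suma + findA i) (cont + 1) (two_le_findA_succ i hi)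
  else cont
termination_by (n - suma + 1).toNat
decreasing_by exact loopA_dec n i suma hi hc

def sumoPrimos (n : Int) : Int := loopA n 2 0 0 (le_refl 2)

-- ===== PORT B =====
theorem two_le_succ (d : Int) (hd : 2 ≤ d) : 2 ≤ d + 1 := by omega

theorem checkB_dec (m d : Int) (hd : 2 ≤ d) (h1 : d * d ≤ m) :
    (m - (d + 1)).toNat < (m - d).toNat := by
  have h2 : 2 * d ≤ d * d := by nlinarith
  omega

-- _is_prime's divisor scan: 'while d*d <= m: if m%d==0: return False; d+=1; return True'
def checkB (m d : Int) (hd : 2 ≤ d) : Bool :=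
  if _h1 : d * d ≤ m then
    if PySem.Int.mod m d == 0 then false else checkB m (d + 1) (two_le_succ d hd)
  else true
termination_by (m - d).toNat
decreasing_by exact checkB_dec m d hd _h1

def isPrimeB (m : Int) : Bool := if m < 2 then false else checkB m 2 (le_refl 2)

-- characterisation of checkB, needed to justify termination of _next_prime
theorem checkB_eq_true_iff (m d : Int) (hd : 2 ≤ d) :
    checkB m d hd = true ↔ ∀ e : Int, d ≤ e → e * e ≤ m → ¬ (e ∣ m) := by
  refine checkB.induct m
    (motive := fun d hd => checkB m d hd = true ↔ ∀ e : Int, d ≤ e → e * e ≤ m → ¬ (e ∣ m))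
    ?_ ?_ ?_ d hd
  · intro d hd hle hmod
    rw [checkB, dif_pos hle, if_pos hmod]
    simp only [Bool.false_eq_true, false_iff]
    intro h
    exact h d le_rfl hle ((PySem.Int.mod_eq_zero_iff_dvd m d).mp (by simpa using hmod))
  · intro d hd hle hmod ih
    rw [checkB, dif_pos hle, if_neg hmod, ih]
    constructor
    · intro h e hde hsq
      rcases eq_or_lt_of_le hde with rfl | hlt
      · intro hdvd
        exact hmod (by simpa using (PySem.Int.mod_eq_zero_iff_dvd m d).mpr hdvd)
      · exact h e (by omega) hsq
    · intro h e hde hsq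
      exact h e (by omega) hsq
  · intro d hd hle
    rw [checkB, dif_neg hle]
    simp only [true_iff]
    intro e hde hsq
    exfalso
    have : d * d ≤ e * e := by nlinarith
    omega

theorem isPrimeB_iff_prime (m : Int) (hm : 2 ≤ m) :
    isPrimeB m = true ↔ m.toNat.Prime := by
  rw [isPrimeB, if_neg (by omega), checkB_eq_true_iff]
  rw [Nat.prime_def_le_sqrt]
  constructor
  · intro h
    refine ⟨by omega, fun e h2 hsq hdvd => ?_⟩
    have hsq' : ((e : Int)) * e ≤ m := by
      have := Nat.le_sqrt.mp hsq
      have : e * e ≤ m.toNat := this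
      omega
    exact h (e : Int) (by omega) hsq' (by
      have : (e : Int) ∣ (m.toNat : Int) := Int.natCast_dvd_natCast.mpr hdvd
      simpa [Int.toNat_of_nonneg (by omega : (0:Int) ≤ m)] using this)
  · intro ⟨_, h⟩ e h2 hsq hdvd
    have he : ((e.toNat : Int)) = e := Int.toNat_of_nonneg (by omega)
    have hdn : e.toNat ∣ m.toNat := by
      apply Int.natCast_dvd_natCast.mp
      rw [he, Int.toNat_of_nonneg (by omega : (0:Int) ≤ m)]
      exact hdvd
    have hm' : ((m.toNat : Int)) = m := Int.toNat_of_nonneg (by omega)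
    have h1 : (e.toNat : Int) * (e.toNat : Int) ≤ (m.toNat : Int) := by
      rw [he, hm']; exact hsq
    have h2' : e.toNat * e.toNat ≤ m.toNat := by exact_mod_cast h1
    exact h e.toNat (by omega) (Nat.le_sqrt.mpr h2') hdn

theorem exists_isPrimeB (i : Int) : ∃ k : Nat, isPrimeB (i + (k : Int)) = true := by
  obtain ⟨p, hple, hp⟩ := Nat.exists_infinite_primes (max i.toNat 2)
  refine ⟨(p - i : Int).toNat, ?_⟩
  have hp2 : 2 ≤ p := le_trans (le_max_right _ _) hple
  have h1 : i + (((p - i : Int).toNat : Nat) : Int) = (p : Int) := by omega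
  rw [h1, isPrimeB_iff_prime (p : Int) (by exact_mod_cast hp2)]
  simpa using hp

theorem nextB_dec (i : Int) (h : ¬ isPrimeB i = true) :
    Nat.find (exists_isPrimeB (i + 1)) < Nat.find (exists_isPrimeB i) := by
  have hK := Nat.find_spec (exists_isPrimeB i)
  set K := Nat.find (exists_isPrimeB i) with hKdef
  have hK0 : K ≠ 0 := by
    intro h0; rw [h0] at hK; norm_num at hK; exact h hK
  have hstep : isPrimeB ((i + 1) + ((K - 1 : Nat) : Int)) = true := by
    have he : (i + 1) + ((K - 1 : Nat) : Int) = i + (K : Int) := by omega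
    rw [he]; exact hK
  have h2 : Nat.find (exists_isPrimeB (i + 1)) ≤ K - 1 := Nat.find_le hstep
  omega

-- _next_prime: advance i until _is_prime(i)
def nextB (i : Int) : Int :=
  if h : isPrimeB i then i else nextB (i + 1)
termination_by Nat.find (exists_isPrimeB i)
decreasing_by exact nextB_dec i h

theorem nextB_ge (i : Int) : i ≤ nextB i := by
  induction i using nextB.induct with
  | case1 i h => rw [nextB, dif_pos h]
  | case2 i h ih => rw [nextB, dif_neg h]; omega

theorem two_le_nextB_succ (p : Int) (hp : 2 ≤ p) : 2 ≤ nextB (p + 1) := by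
  have := nextB_ge (p + 1); omega

theorem loopB_dec (p remaining : Int) (hp : 2 ≤ p) (hc : 0 ≤ remaining) :
    (remaining - p + 1).toNat < (remaining + 1).toNat := by omega

-- outer while loop of B, state (p, remaining, count); 2 ≤ p is B's loop invariant
def loopB (n p remaining count : Int) (hp : 2 ≤ p) : Int :=
  if hc : 0 ≤ remaining then
    loopB n (nextB (p + 1)) (remaining - p) (count + 1) (two_le_nextB_succ p hp)
  else count
termination_by (remaining + 1).toNat
decreasing_by exact loopB_dec p remaining hp hc

def sumoPrimos_alt (n : Int) : Int := loopB n 2 n 0 (le_refl 2)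

-- ===== PRECONDITION & SPEC =====
def Spec_sumoPrimos (n : Int) (out : Int) : Prop := out = sumoPrimos_alt n
instance (n : Int) (out : Int) : Decidable (Spec_sumoPrimos n out) := by unfold Spec_sumoPrimos; infer_instance

-- ===== CLAIM (what is proved, stated in full; the proofs are below) =====
def Claim_equal_sumoPrimos : Prop := ∀ (n : Int), Dom_sumoPrimos n → Spec_sumoPrimos n (sumoPrimos n)

-- ===== LEMMAS AND PROOFS =====

theorem esPrimo_iff_prime (m : Int) (hm : 2 ≤ m) :
    esPrimo m = true ↔ m.toNat.Prime := by
  rw [esPrimo_eq_true_iff, Nat.prime_def_lt']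
  constructor
  · intro h
    refine ⟨by omega, fun e h2 hlt hdvd => ?_⟩
    exact h (e : Int) (by omega) (by omega) (by
      have : (e : Int) ∣ (m.toNat : Int) := Int.natCast_dvd_natCast.mpr hdvd
      simpa [Int.toNat_of_nonneg (by omega : (0:Int) ≤ m)] using this)
  · intro ⟨_, h⟩ e h2 hlt hdvd
    have he : ((e.toNat : Int)) = e := Int.toNat_of_nonneg (by omega)
    have hdn : e.toNat ∣ m.toNat := by
      apply Int.natCast_dvd_natCast.mp
      rw [he, Int.toNat_of_nonneg (by omega : (0:Int) ≤ m)]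
      exact hdvd
    exact h e.toNat (by omega) (by omega) hdn

theorem esPrimo_eq_isPrimeB (m : Int) (hm : 2 ≤ m) : esPrimo m = isPrimeB m := by
  rw [Bool.eq_iff_iff, esPrimo_iff_prime m hm, isPrimeB_iff_prime m hm]

theorem findA_eq_nextB (i : Int) : 2 ≤ i → findA i = nextB i := by
  induction i using findA.induct with
  | case1 i h =>
    intro hi
    rw [findA, dif_pos h, nextB, dif_pos (by rw [← esPrimo_eq_isPrimeB i hi]; exact h)]
  | case2 i h ih =>
    intro hi
    rw [findA, dif_neg h, nextB,
        dif_neg (by rw [← esPrimo_eq_isPrimeB i hi]; exact h), ih (by omega)]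

theorem loop_eq (n : Int) : ∀ (k : Nat) (i suma cont p : Int) (hi : 2 ≤ i) (hp : 2 ≤ p),
    p = nextB i → (n - suma + 1).toNat ≤ k →
    loopA n i suma cont hi = loopB n p (n - suma) cont hp := by
  intro k
  induction k with
  | zero =>
    intro i suma cont p hi hp hpe hk
    rw [loopA, dif_neg (by omega), loopB, dif_neg (by omega)]
  | succ k ih =>
    intro i suma cont p hi hp hpe hk
    by_cases hc : suma ≤ n
    · rw [loopA, dif_pos hc, loopB, dif_pos (by omega)]
      have hfind : findA i = p := by rw [findA_eq_nextB i hi, hpe]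
      simp only [hfind]
      have hrem : n - suma - p = n - (suma + p) := by ring
      rw [hrem]
      exact ih (p + 1) (suma + p) (cont + 1) (nextB (p + 1))
        (by omega) (by have := nextB_ge (p + 1); omega) rfl (by omega)
    · rw [loopA, dif_neg hc, loopB, dif_neg (by omega)]

theorem nextB_two : nextB 2 = 2 := by
  rw [nextB, dif_pos]
  rw [isPrimeB, if_neg (by norm_num), checkB, dif_neg (by norm_num)]

-- ===== VERDICT (by name: the statement is the Claim_ definition above) =====
theorem sumoPrimos_spec : Claim_equal_sumoPrimos := by
  intro n _
  show sumoPrimos n = sumoPrimos_alt n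
  rw [sumoPrimos, sumoPrimos_alt]
  have := loop_eq n (n - 0 + 1).toNat 2 0 0 2 (le_refl 2) (le_refl 2)
    nextB_two.symm le_rfl
  rw [this]
  norm_num
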